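-- pv_equiv track=rewrite | github.com/infiniflow/ragflow | api/db/services/task_service.py | trim_header_by_lines
-- ===== SOURCE A (Python) =====
-- def trim_header_by_lines(text: str, max_length) -> str:
--     # Trim header text to maximum length while preserving line breaks
--     # Args:
--     #     text: Input text to trim
--     #     max_length: Maximum allowed length
--     # Returns:
--     #     Trimmed text
--     len_text = len(text)
--     if len_text <= max_length:
--         return text
--     for i in range(len_text):
--         if text[i] == '\n' and len_text - i <= max_length:
--             return text[i + 1:]
--     return text
-- ===== SOURCE B (Python) =====
-- def trim_header_by_lines(text: str, max_length) -> str: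
--     # Keep the text if it already fits. Otherwise split it into lines and
--     # accumulate lines from the END, keeping the longest trailing run of
--     # lines whose '\n'-joined length is <= max_length - 1; if not even the
--     # last line fits, return the text unchanged.
--     if len(text) <= max_length:
--         return text
--     lines = text.split('\n')
--     kept = []
--     total = 0
--     for line in reversed(lines[1:]):
--         total += len(line) + (1 if kept else 0)
--         if total > max_length - 1:
--             break
--         kept.append(line)
--     if not kept:
--         return text
--     kept.reverse()
--     return '\n'.join(kept)
-- ===== Notes on version B (the rewrite author's own statement) =====
-- stated objective: faster
-- what changed: B replaces A's Python-level front-to-back character scan for the first qualifying newline with a line-based algorithm: split the text on '\n' once (a single C-level pass), then accumulate lines from the END, keeping the longest trailing run of lines whose joined length is <= max_length - 1, and rejoin them (falling back to the whole text when not even the last line fits).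
import Mathlib
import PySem

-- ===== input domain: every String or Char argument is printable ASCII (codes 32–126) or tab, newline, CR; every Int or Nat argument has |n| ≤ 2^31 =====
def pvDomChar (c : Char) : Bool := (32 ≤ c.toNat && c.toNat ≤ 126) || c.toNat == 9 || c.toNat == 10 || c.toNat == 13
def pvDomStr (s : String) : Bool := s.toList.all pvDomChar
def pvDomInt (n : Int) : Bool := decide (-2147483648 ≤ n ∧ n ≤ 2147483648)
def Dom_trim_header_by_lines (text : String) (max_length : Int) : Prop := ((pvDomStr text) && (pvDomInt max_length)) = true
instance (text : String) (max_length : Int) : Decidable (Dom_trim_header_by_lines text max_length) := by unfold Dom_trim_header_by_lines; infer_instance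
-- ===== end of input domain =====

-- B splits the text into lines once and accumulates the longest fitting run of
-- trailing lines from the END, instead of A's front-to-back character scan for
-- the first qualifying newline; return value only, nothing is mutated.

-- ===== PORT A =====
-- the 'for i in range(len_text)' loop with its early return 'return text[i+1:]'
def trimAGo (text : String) (full : List Char) (len_text max_length : Int) :
    List Char → Nat → String
  | [], _ => text
  | c :: rest, i =>
    if c = '\n' ∧ len_text - (i : Int) ≤ max_length then
      String.ofList (PySem.List.slice full (some ((i : Int) + 1)) none)
    else trimAGo text full len_text max_length rest (i + 1)

def trim_header_by_lines (text : String) (max_length : Int) : String :=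
  let len_text : Int := PySem.Str.len text
  if len_text ≤ max_length then text
  else trimAGo text text.toList len_text max_length text.toList 0

-- ===== PORT B =====
-- the 'for line in reversed(lines[1:])' loop: total accumulates the joined
-- length, kept.append(line) while it fits, break on overflow
def trimBGo (m : Int) : List (List Char) → List (List Char) → Int → List (List Char)
  | [], kept, _ => kept
  | l :: rest, kept, total =>
    let total' := total + (l.length : Int) + (if kept = [] then 0 else 1)
    if m - 1 < total' then kept
    else trimBGo m rest (kept ++ [l]) total'

def trim_header_by_lines_alt (text : String) (max_length : Int) : String :=
  if PySem.Str.len text ≤ max_length then text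
  else
    let lines := PySem.Chars.splitOn text.toList ['\n']
    let kept := trimBGo max_length (PySem.List.slice lines (some 1) none).reverse [] 0
    if kept = [] then text
    else String.ofList (PySem.Chars.join ['\n'] kept.reverse)

-- ===== PRECONDITION & SPEC =====
def Spec_trim_header_by_lines (text : String) (max_length : Int) (out : String) : Prop := out = trim_header_by_lines_alt text max_length
instance (text : String) (max_length : Int) (out : String) : Decidable (Spec_trim_header_by_lines text max_length out) := by unfold Spec_trim_header_by_lines; infer_instance

-- ===== CLAIM (what is proved, stated in full; the proofs are below) =====
def Claim_equal_trim_header_by_lines : Prop := ∀ (text : String) (max_length : Int), Dom_trim_header_by_lines text max_length → Spec_trim_header_by_lines text max_length (trim_header_by_lines text max_length)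

-- ===== LEMMAS AND PROOFS =====

-- decomposition of a char list at its FIRST newline (proof-only helper)
def splitFirst : List Char → Option (List Char × List Char)
  | [] => none
  | c :: r =>
    if c = '\n' then some ([], r)
    else (splitFirst r).map (fun p => (c :: p.1, p.2))

-- abstract description of A's scan: the suffix after the first newline whose
-- tail fits in max_length - 1 characters
def Ascan (m : Int) : List Char → Option (List Char)
  | [] => none
  | c :: r => if c = '\n' ∧ (r.length : Int) ≤ m - 1 then some r else Ascan m r

-- clean structural form of PySem.Chars.splitOn for the one-char separator '\n'
def mySplitGo : List Char → List Char → List (List Char)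
  | [], cur => [cur.reverse]
  | c :: r, cur => if c = '\n' then cur.reverse :: mySplitGo r [] else mySplitGo r (c :: cur)

-- length of the '\n'-joined list of lines
def joinLen (S : List (List Char)) : Int := ((PySem.Chars.join ['\n'] S).length : Int)

-- abstract description of B's loop: the longest fitting suffix of the line list
def longestFit (m : Int) : List (List Char) → List (List Char)
  | [] => []
  | h :: t => if joinLen (h :: t) ≤ m - 1 then h :: t else longestFit m t

theorem splitFirst_none (l : List Char) : splitFirst l = none ↔ '\n' ∉ l := by
  induction l with
  | nil => simp [splitFirst]
  | cons c r ih =>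
    by_cases hc : c = '\n'
    · simp [splitFirst, hc]
    · simp [splitFirst, hc, Option.map_eq_none_iff, ih, Ne.symm hc]

theorem splitFirst_some (l : List Char) : ∀ (a r : List Char),
    splitFirst l = some (a, r) → l = a ++ '\n' :: r ∧ '\n' ∉ a := by
  induction l with
  | nil => intro a r h; simp [splitFirst] at h
  | cons c t ih =>
    intro a r h
    by_cases hc : c = '\n'
    · rw [splitFirst, if_pos hc] at h
      obtain ⟨ha, hr⟩ := Prod.mk.injEq .. ▸ Option.some.inj h
      subst ha; subst hr
      simp [hc]
    · rw [splitFirst, if_neg hc] at h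
      obtain ⟨⟨p1, p2⟩, hp, heq⟩ := Option.map_eq_some_iff.mp h
      injection heq with h1 h2
      subst h1; subst h2
      obtain ⟨hl, hnl⟩ := ih p1 p2 hp
      exact ⟨by simp [hl], by simp [hnl, Ne.symm hc]⟩

theorem go_eq (l : List Char) : ∀ (fuel : Nat) (cur : List Char)
    (acc : List (List Char)), l.length ≤ fuel →
    PySem.Chars.splitOn.go ['\n'] fuel l cur acc = acc.reverse ++ mySplitGo l cur := by
  induction l with
  | nil =>
    intro fuel cur acc _
    cases fuel <;> simp [PySem.Chars.splitOn.go, mySplitGo]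
  | cons c r ih =>
    intro fuel cur acc hf
    cases fuel with
    | zero => simp at hf
    | succ f =>
      by_cases hc : c = '\n'
      · rw [PySem.Chars.splitOn.go, if_pos (by simp [hc])]
        simp only [List.length_singleton, List.drop_one, List.tail_cons]
        rw [ih f [] (cur.reverse :: acc) (by simpa using hf)]
        simp [mySplitGo, hc]
      · rw [PySem.Chars.splitOn.go, if_neg (by simp [List.isPrefixOf, Ne.symm hc])]
        rw [ih f (c :: cur) acc (by simpa using hf)]
        simp [mySplitGo, hc]

theorem splitOn_eq (l : List Char) :
    PySem.Chars.splitOn l ['\n'] = mySplitGo l [] := by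
  unfold PySem.Chars.splitOn
  rw [go_eq l (l.length + 1) [] [] (by omega)]
  simp

theorem mySplitGo_no_nl (l : List Char) : ∀ cur, '\n' ∉ l →
    mySplitGo l cur = [cur.reverse ++ l] := by
  induction l with
  | nil => intro cur _; simp [mySplitGo]
  | cons c r ih =>
    intro cur h
    have hc : c ≠ '\n' := by intro hc; exact h (by simp [hc])
    rw [mySplitGo, if_neg hc, ih (c :: cur) (fun hm => h (by simp [hm]))]
    simp

theorem mySplitGo_split (l : List Char) : ∀ (a r : List Char) (cur : List Char),
    splitFirst l = some (a, r) →
    mySplitGo l cur = (cur.reverse ++ a) :: mySplitGo r [] := by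
  induction l with
  | nil => intro a r cur h; simp [splitFirst] at h
  | cons c t ih =>
    intro a r cur h
    by_cases hc : c = '\n'
    · rw [splitFirst, if_pos hc] at h
      obtain ⟨ha, hr⟩ := Prod.mk.injEq .. ▸ Option.some.inj h
      subst ha; subst hr
      rw [mySplitGo, if_pos hc]
      simp
    · rw [splitFirst, if_neg hc] at h
      obtain ⟨⟨p1, p2⟩, hp, heq⟩ := Option.map_eq_some_iff.mp h
      injection heq with h1 h2
      subst h1; subst h2
      rw [mySplitGo, if_neg hc, ih p1 p2 (c :: cur) hp]
      simp

theorem splitOn_no_nl (l : List Char) (h : '\n' ∉ l) :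
    PySem.Chars.splitOn l ['\n'] = [l] := by
  rw [splitOn_eq, mySplitGo_no_nl l [] h]; simp

theorem splitOn_split (l a r : List Char) (h : splitFirst l = some (a, r)) :
    PySem.Chars.splitOn l ['\n'] = a :: PySem.Chars.splitOn r ['\n'] := by
  rw [splitOn_eq, mySplitGo_split l a r [] h, splitOn_eq]
  simp

theorem mySplitGo_ne_nil (l : List Char) : ∀ cur, mySplitGo l cur ≠ [] := by
  induction l with
  | nil => intro cur; simp [mySplitGo]
  | cons c r ih =>
    intro cur
    by_cases hc : c = '\n' <;> simp [mySplitGo, hc, ih]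

theorem splitOn_ne_nil (l : List Char) : PySem.Chars.splitOn l ['\n'] ≠ [] := by
  rw [splitOn_eq]; exact mySplitGo_ne_nil l []

theorem join_splitOn : ∀ (n : Nat) (l : List Char), l.length ≤ n →
    PySem.Chars.join ['\n'] (PySem.Chars.splitOn l ['\n']) = l := by
  intro n
  induction n with
  | zero =>
    intro l hl
    have : l = [] := by cases l <;> simp_all
    subst this
    simp [splitOn_no_nl, PySem.Chars.join_singleton]
  | succ k ih =>
    intro l hl
    match hsf : splitFirst l with
    | none =>
      rw [splitOn_no_nl l ((splitFirst_none l).mp hsf), PySem.Chars.join_singleton]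
    | some (a, r) =>
      obtain ⟨hdec, _⟩ := splitFirst_some l a r hsf
      rw [splitOn_split l a r hsf]
      obtain ⟨h0, t, ht⟩ : ∃ h0 t, PySem.Chars.splitOn r ['\n'] = h0 :: t := by
        match h : PySem.Chars.splitOn r ['\n'] with
        | [] => exact absurd h (splitOn_ne_nil r)
        | h0 :: t => exact ⟨h0, t, rfl⟩
      have hr : r.length ≤ k := by
        have := hdec ▸ hl
        simp [List.length_append] at this
        omega
      rw [ht, PySem.Chars.join_cons_cons, ← ht, ih r hr, hdec]
      simp

theorem joinLen_cons (a : List Char) (S : List (List Char)) (h : S ≠ []) :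
    joinLen (a :: S) = (a.length : Int) + 1 + joinLen S := by
  match S with
  | [] => exact absurd rfl h
  | b :: t =>
    simp [joinLen, PySem.Chars.join_cons_cons, List.length_append]
    omega

theorem joinLen_singleton (a : List Char) : joinLen [a] = (a.length : Int) := by
  simp [joinLen, PySem.Chars.join_singleton]

theorem joinLen_nil : joinLen [] = 0 := by simp [joinLen, PySem.Chars.join_nil]

theorem joinLen_le_cons (a : List Char) (S : List (List Char)) :
    joinLen S ≤ joinLen (a :: S) := by
  match S with
  | [] => rw [joinLen_nil, joinLen_singleton]; positivity
  | b :: t =>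
    rw [joinLen_cons a (b :: t) (by simp)]
    have : (0 : Int) ≤ a.length := by positivity
    omega

theorem joinLen_le_append (P S : List (List Char)) :
    joinLen S ≤ joinLen (P ++ S) := by
  induction P with
  | nil => simp
  | cons a P ih => simpa using le_trans ih (joinLen_le_cons a (P ++ S))

theorem longestFit_self (m : Int) (S : List (List Char))
    (h : S = [] ∨ joinLen S ≤ m - 1) : longestFit m S = S := by
  match S with
  | [] => rfl
  | h0 :: t =>
    rw [longestFit, if_pos]
    rcases h with h | h
    · simp at h
    · exact h

theorem longestFit_unfit (m : Int) : ∀ (P : List (List Char)) (l : List Char)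
    (S : List (List Char)), m - 1 < joinLen (l :: S) → (S ≠ [] → joinLen S ≤ m - 1) →
    longestFit m (P ++ l :: S) = S := by
  intro P
  induction P with
  | nil =>
    intro l S hbig hfit
    rw [List.nil_append, longestFit, if_neg (by omega)]
    exact longestFit_self m S (by
      by_cases h : S = []
      · exact Or.inl h
      · exact Or.inr (hfit h))
  | cons a P ih =>
    intro l S hbig hfit
    have hmono : joinLen (l :: S) ≤ joinLen (a :: (P ++ l :: S)) :=
      le_trans (joinLen_le_append P (l :: S)) (joinLen_le_cons a (P ++ l :: S))
    rw [List.cons_append, longestFit, if_neg (by omega)]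
    exact ih l S hbig hfit

-- B's loop computes (reversed) the longest fitting suffix of the line list
theorem trimBGo_eq (m : Int) : ∀ (R S : List (List Char)),
    (S ≠ [] → joinLen S ≤ m - 1) →
    trimBGo m R S.reverse (joinLen S) = (longestFit m (R.reverse ++ S)).reverse := by
  intro R
  induction R with
  | nil =>
    intro S hS
    rw [trimBGo, List.reverse_nil, List.nil_append, longestFit_self m S (by
      by_cases h : S = []
      · exact Or.inl h
      · exact Or.inr (hS h))]
  | cons l R ih =>
    intro S hS
    have htot : joinLen S + (l.length : Int) + (if S.reverse = [] then 0 else 1)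
        = joinLen (l :: S) := by
      by_cases h : S = []
      · subst h; simp [joinLen_nil, joinLen_singleton]
      · rw [if_neg (by simpa using h), joinLen_cons l S h]; omega
    rw [trimBGo]
    simp only [htot]
    by_cases hbig : m - 1 < joinLen (l :: S)
    · rw [if_pos hbig, List.reverse_cons, List.append_assoc, List.singleton_append,
        longestFit_unfit m R.reverse l S hbig hS]
    · rw [if_neg hbig]
      have : S.reverse ++ [l] = (l :: S).reverse := by simp
      rw [this, ih (l :: S) (fun _ => by omega)]
      simp

-- A's scan equals Ascan on the scanned suffix
theorem trimAGo_eq (text : String) (full : List Char) (m : Int) :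
    ∀ (rest : List Char) (i : Nat), rest = full.drop i →
    trimAGo text full (full.length : Int) m rest i
      = (match Ascan m rest with
         | none => text
         | some u => String.ofList u) := by
  intro rest
  induction rest with
  | nil => intro i _; rfl
  | cons c r ih =>
    intro i hr
    have hi : i < full.length := by
      by_contra h
      rw [List.drop_eq_nil_of_le (by omega)] at hr
      exact List.cons_ne_nil c r hr
    have hlen : (c :: r).length = full.length - i := by
      rw [hr, List.length_drop]
    have hrlen : r.length = full.length - (i + 1) := by
      simp at hlen; omega
    have hrdrop : r = full.drop (i + 1) := by
      have := congrArg List.tail hr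
      simpa [List.tail_drop] using this
    have hcond : (c = '\n' ∧ (full.length : Int) - (i : Int) ≤ m)
        ↔ (c = '\n' ∧ (r.length : Int) ≤ m - 1) := by
      constructor
      · rintro ⟨h1, h2⟩; exact ⟨h1, by omega⟩
      · rintro ⟨h1, h2⟩; exact ⟨h1, by omega⟩
    rw [trimAGo, Ascan]
    by_cases h : c = '\n' ∧ (r.length : Int) ≤ m - 1
    · rw [if_pos (hcond.mpr h), if_pos h]
      have : ((i : Int) + 1) = (((i + 1 : Nat)) : Int) := by push_cast; ring
      rw [this, PySem.List.slice_from full (by positivity)]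
      simp [← hrdrop]
    · rw [if_neg (fun hc => h (hcond.mp hc)), if_neg h]
      exact ih (i + 1) hrdrop

-- Ascan skips a newline-free prefix and checks the tail after the first newline
theorem Ascan_no_nl (m : Int) (l : List Char) (h : '\n' ∉ l) : Ascan m l = none := by
  induction l with
  | nil => rfl
  | cons c r ih =>
    have hc : c ≠ '\n' := fun hc => h (by simp [hc])
    rw [Ascan, if_neg (by simp [hc])]
    exact ih (fun hm => h (by simp [hm]))

theorem Ascan_split (m : Int) (l : List Char) : ∀ (a r : List Char),
    splitFirst l = some (a, r) →
    Ascan m l = if (r.length : Int) ≤ m - 1 then some r else Ascan m r := by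
  induction l with
  | nil => intro a r h; simp [splitFirst] at h
  | cons c t ih =>
    intro a r h
    by_cases hc : c = '\n'
    · rw [splitFirst, if_pos hc] at h
      simp only [Option.some.injEq, Prod.mk.injEq] at h
      obtain ⟨ha, hr⟩ := h
      subst hr; subst ha
      rw [Ascan]
      by_cases hfit : (t.length : Int) ≤ m - 1
      · rw [if_pos ⟨hc, hfit⟩, if_pos hfit]
      · rw [if_neg (by tauto), if_neg hfit]
    · rw [splitFirst, if_neg hc] at h
      obtain ⟨⟨p1, p2⟩, hp, heq⟩ := Option.map_eq_some_iff.mp h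
      injection heq with h1 h2
      subst h1; subst h2
      rw [Ascan, if_neg (by simp [hc]), ih p1 p2 hp]

-- bridge: the longest fitting suffix of r's line list is exactly the line list
-- of the suffix A's scan selects inside r (or r itself when r fits)
theorem bridge (m : Int) : ∀ (n : Nat) (r : List Char), r.length ≤ n →
    longestFit m (PySem.Chars.splitOn r ['\n'])
      = (match (if (r.length : Int) ≤ m - 1 then some r else Ascan m r) with
         | none => []
         | some u => PySem.Chars.splitOn u ['\n']) := by
  intro n
  induction n with
  | zero =>
    intro r hr
    have hnil : r = [] := by cases r <;> simp_all
    subst hnil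
    rw [splitOn_no_nl [] (by simp)]
    by_cases hfit : ((([] : List Char).length : Int) ≤ m - 1)
    · rw [if_pos hfit]
      exact longestFit_self m [[]] (Or.inr (by rw [joinLen_singleton]; exact hfit))
    · rw [if_neg hfit, Ascan_no_nl m [] (by simp)]
      rw [longestFit, if_neg (by rw [joinLen_singleton]; exact hfit)]
      rfl
  | succ k ih =>
    intro r hr
    have hjoin : joinLen (PySem.Chars.splitOn r ['\n']) = (r.length : Int) := by
      rw [joinLen, join_splitOn r.length r le_rfl]
    by_cases hfit : (r.length : Int) ≤ m - 1
    · rw [if_pos hfit]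
      exact longestFit_self m _ (Or.inr (by rw [hjoin]; exact hfit))
    · rw [if_neg hfit]
      match hsf : splitFirst r with
      | none =>
        rw [Ascan_no_nl m r ((splitFirst_none r).mp hsf),
          splitOn_no_nl r ((splitFirst_none r).mp hsf)]
        rw [longestFit, if_neg (by rw [← splitOn_no_nl r ((splitFirst_none r).mp hsf), hjoin]; omega)]
        rfl
      | some (a, r') =>
        obtain ⟨hdec, _⟩ := splitFirst_some r a r' hsf
        have hr' : r'.length ≤ k := by
          have := hdec ▸ hr
          simp [List.length_append] at this
          omega
        rw [Ascan_split m r a r' hsf, splitOn_split r a r' hsf]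
        obtain ⟨h0, t, ht⟩ : ∃ h0 t, PySem.Chars.splitOn r' ['\n'] = h0 :: t := by
          match h : PySem.Chars.splitOn r' ['\n'] with
          | [] => exact absurd h (splitOn_ne_nil r')
          | h0 :: t => exact ⟨h0, t, rfl⟩
        rw [ht, longestFit, if_neg (by
          rw [← ht, ← splitOn_split r a r' hsf, hjoin]; omega), ← ht]
        exact ih r' hr'

-- the main equivalence
theorem trim_eq (text : String) (max_length : Int) :
    trim_header_by_lines text max_length = trim_header_by_lines_alt text max_length := by
  unfold trim_header_by_lines trim_header_by_lines_alt
  set m := max_length with hm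
  set cs := text.toList with hcs
  have hlen : PySem.Str.len text = (cs.length : Int) := PySem.Str.len_eq text
  by_cases hfit : PySem.Str.len text ≤ m
  · rw [if_pos hfit, if_pos hfit]
  · rw [hlen] at hfit ⊢
    rw [if_neg hfit, if_neg hfit]
    -- A side
    rw [trimAGo_eq text cs m cs 0 rfl]
    -- B side: the slice is drop 1, and the loop is longestFit
    have hslice : PySem.List.slice (PySem.Chars.splitOn cs ['\n']) (some 1) none
        = (PySem.Chars.splitOn cs ['\n']).drop 1 := by
      rw [show ((1 : Int)) = (((1 : Nat)) : Int) from rfl,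
        PySem.List.slice_from _ (by exact_mod_cast Nat.zero_le 1)]
      simp
    simp only [hslice]
    have hloop : trimBGo m ((PySem.Chars.splitOn cs ['\n']).drop 1).reverse [] 0
        = (longestFit m ((PySem.Chars.splitOn cs ['\n']).drop 1)).reverse := by
      have := trimBGo_eq m ((PySem.Chars.splitOn cs ['\n']).drop 1).reverse []
        (fun h => absurd rfl h)
      simpa [joinLen_nil] using this
    rw [hloop]
    match hsf : splitFirst cs with
    | none =>
      have hnl : '\n' ∉ cs := (splitFirst_none cs).mp hsf
      rw [Ascan_no_nl m cs hnl, splitOn_no_nl cs hnl]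
      simp [longestFit]
    | some (a, r) =>
      obtain ⟨hdec, _⟩ := splitFirst_some cs a r hsf
      rw [Ascan_split m cs a r hsf, splitOn_split cs a r hsf]
      simp only [List.drop_one, List.tail_cons]
      rw [bridge m r.length r le_rfl]
      by_cases hrfit : (r.length : Int) ≤ m - 1
      · rw [if_pos hrfit]
        simp only
        rw [if_neg (by simp [splitOn_ne_nil r]), List.reverse_reverse,
          join_splitOn r.length r le_rfl]
      · rw [if_neg hrfit]
        match hA : Ascan m r with
        | none => simp
        | some u =>
          simp only
          rw [if_neg (by simp [splitOn_ne_nil u]), List.reverse_reverse,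
            join_splitOn u.length u le_rfl]

-- ===== VERDICT (by name: the statement is the Claim_ definition above) =====
theorem trim_header_by_lines_spec : Claim_equal_trim_header_by_lines := by
  intro text max_length _
  exact trim_eq text max_length
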